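-- pv_equiv track=rewrite | github.com/KDT-02-Algorithm-Study/Algorithm-Study | week24_230706/pg17683_방금그곡/pg17683_최은비.py | sharp_convert
-- ===== SOURCE A (Python) =====
-- def sharp_convert(note):
--     sharp = {"C#": "H", "D#": "I", "F#": "J", "G#": "K", "A#": "L"}
--     for j in range(len(note)-1):
--         if j + 1 > len(note) - 1:
--             return note
--
--         tmp = note[j]+note[j+1]
--         if tmp in sharp:
--             note = note.replace(tmp, sharp[tmp])
--
--     return note
-- ===== SOURCE B (Python) =====
-- def sharp_convert(note):
--     sharp = {"C": "H", "D": "I", "F": "J", "G": "K", "A": "L"}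
--     out = []
--     i = 0
--     n = len(note)
--     while i < n:
--         c = note[i]
--         if c in sharp and i + 1 < n and note[i + 1] == "#":
--             out.append(sharp[c])
--             i += 2
--         else:
--             out.append(c)
--             i += 1
--     return "".join(out)
-- ===== Notes on version B (the rewrite author's own statement) =====
-- stated objective: alternative
-- what changed: A repeatedly calls global str.replace inside an index loop with an early-return length re-check; B builds the result in one left-to-right pass, mapping each sharp pair ('C#'..'A#') to its single letter as it is encountered.
import Mathlib
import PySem

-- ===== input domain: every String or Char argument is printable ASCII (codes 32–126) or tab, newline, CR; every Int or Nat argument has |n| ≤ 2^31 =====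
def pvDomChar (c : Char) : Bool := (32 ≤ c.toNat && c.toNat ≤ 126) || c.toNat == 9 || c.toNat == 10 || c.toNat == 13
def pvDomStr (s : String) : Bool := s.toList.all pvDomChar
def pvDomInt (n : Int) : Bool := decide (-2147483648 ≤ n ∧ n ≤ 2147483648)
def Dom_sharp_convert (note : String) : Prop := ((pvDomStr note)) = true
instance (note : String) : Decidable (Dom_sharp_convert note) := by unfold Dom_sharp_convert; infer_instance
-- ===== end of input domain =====

-- B replaces A's repeated global str.replace passes with a single left-to-right scan that maps each sharp pair once (objective: alternative).


-- ===== PORT A =====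
def pvSharpDict : PySem.Dict String String :=
  PySem.Dict.ofList [("C#", "H"), ("D#", "I"), ("F#", "J"), ("G#", "K"), ("A#", "L")]

-- the for-loop over range(len(note)-1), with the early return and the rebinding of note
def pvLoopA : List Int → String → String
  | [], note => note
  | j :: js, note =>
    if j + 1 > PySem.Str.len note - 1 then note
    else
      match PySem.Str.pyGet? note j, PySem.Str.pyGet? note (j + 1) with
      | some c1, some c2 =>
        let tmp := String.ofList [c1, c2]
        match pvSharpDict.get? tmp with
        | some rep => pvLoopA js (PySem.Str.replace note tmp rep)
        | none => pvLoopA js note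
      | _, _ => note

def sharp_convert (note : String) : String :=
  pvLoopA (PySem.List.pyRange 0 (PySem.Str.len note - 1) 1) note

-- ===== PORT B =====
-- Source B's letter → sharp-replacement dict, as a function on the single characters
def pvSharpChar? : Char → Option Char
  | 'C' => some 'H'
  | 'D' => some 'I'
  | 'F' => some 'J'
  | 'G' => some 'K'
  | 'A' => some 'L'
  | _ => none

-- the while loop of Source B as the obvious structural recursion over the character list
def pvScanB : List Char → List Char
  | [] => []
  | [c] => [c]
  | c :: d :: rest =>
    match pvSharpChar? c with
    | some m => if d = '#' then m :: pvScanB rest else c :: pvScanB (d :: rest)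
    | none => c :: pvScanB (d :: rest)

def sharp_convert_alt (note : String) : String :=
  String.ofList (pvScanB note.toList)

-- ===== PRECONDITION & SPEC =====
def Spec_sharp_convert (note : String) (out : String) : Prop := out = sharp_convert_alt note
instance (note : String) (out : String) : Decidable (Spec_sharp_convert note out) := by unfold Spec_sharp_convert; infer_instance

-- ===== CLAIM (what is proved, stated in full; the proofs are below) =====
def Claim_equal_sharp_convert : Prop := ∀ (note : String), Dom_sharp_convert note → Spec_sharp_convert note (sharp_convert note)

-- ===== LEMMAS AND PROOFS =====

-- what Python's note.replace("X#", "Y") computes, as a structural recursion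
def pvRepl2 (a m : Char) : List Char → List Char
  | [] => []
  | [c] => [c]
  | c :: d :: rest => if c = a ∧ d = '#' then m :: pvRepl2 a m rest else c :: pvRepl2 a m (d :: rest)

-- a sharp-key pair starts at index i
def pvKeyAt (s : List Char) (i : Nat) : Prop :=
  (∃ c, s[i]? = some c ∧ (pvSharpChar? c).isSome) ∧ s[i + 1]? = some '#'

lemma pv_sharp_cases {a m : Char} (h : pvSharpChar? a = some m) :
    (a = 'C' ∧ m = 'H') ∨ (a = 'D' ∧ m = 'I') ∨ (a = 'F' ∧ m = 'J') ∨
    (a = 'G' ∧ m = 'K') ∨ (a = 'A' ∧ m = 'L') := by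
  unfold pvSharpChar? at h
  split at h <;> simp_all [eq_comm]

lemma pv_letter_facts {a m : Char} (h : pvSharpChar? a = some m) :
    pvSharpChar? m = none ∧ m ≠ '#' ∧ a ≠ '#' := by
  rcases pv_sharp_cases h with ⟨rfl, rfl⟩ | ⟨rfl, rfl⟩ | ⟨rfl, rfl⟩ | ⟨rfl, rfl⟩ | ⟨rfl, rfl⟩ <;> decide

lemma pv_replace_go_eq (a m : Char) :
    ∀ (fuel : Nat) (s acc : List Char), s.length ≤ fuel →
      PySem.Chars.replace.go [a, '#'] [m] fuel s acc = acc.reverse ++ pvRepl2 a m s := by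
  intro fuel
  induction fuel with
  | zero => intro s acc h; rw [List.length_eq_zero_iff.mp (Nat.le_zero.mp h)]
            simp [PySem.Chars.replace.go, pvRepl2]
  | succ n ih =>
    intro s acc h
    match s with
    | [] => simp [PySem.Chars.replace.go, pvRepl2]
    | [c] =>
      simp only [PySem.Chars.replace.go]
      have : ¬ ([a, '#'].isPrefixOf [c] = true) := by simp [List.isPrefixOf]
      rw [if_neg this, ih [] (c :: acc) (by simp)]
      simp [pvRepl2]
    | c :: d :: rest =>
      simp only [PySem.Chars.replace.go]
      by_cases hm : c = a ∧ d = '#'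
      · obtain ⟨rfl, rfl⟩ := hm
        have hp : [c, '#'].isPrefixOf (c :: '#' :: rest) = true := by simp [List.isPrefixOf]
        rw [if_pos hp]
        simp only [List.length, List.drop]
        rw [ih rest _ (by simp at h; omega)]
        simp [pvRepl2]
      · have hp : ¬ ([a, '#'].isPrefixOf (c :: d :: rest) = true) := by
          simp [List.isPrefixOf]; intro h1 h2; exact hm ⟨h1.symm, h2.symm⟩
        rw [if_neg hp]
        rw [ih (d :: rest) _ (by simp at h ⊢; omega)]
        simp [pvRepl2, hm]

lemma pv_replace_eq_repl2 (a m : Char) (s : List Char) :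
    PySem.Chars.replace s [a, '#'] [m] = pvRepl2 a m s := by
  have he : ([a, '#'] : List Char).isEmpty = false := rfl
  rw [PySem.Chars.replace, he]
  simp only [Bool.false_eq_true, if_false]
  exact (pv_replace_go_eq a m s.length s [] le_rfl).trans (by simp)

lemma pv_repl2_len (a m : Char) : ∀ s : List Char, (pvRepl2 a m s).length ≤ s.length
  | [] => by simp [pvRepl2]
  | [c] => by simp [pvRepl2]
  | c :: d :: rest => by
    by_cases hm : c = a ∧ d = '#'
    · simp only [pvRepl2, if_pos hm, List.length_cons]
      have := pv_repl2_len a m rest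
      omega
    · simp only [pvRepl2, if_neg hm, List.length_cons]
      have := pv_repl2_len a m (d :: rest)
      simp at this ⊢; omega

lemma pv_scan_cons_nonsharp {c : Char} (h : pvSharpChar? c = none) (l : List Char) :
    pvScanB (c :: l) = c :: pvScanB l := by
  cases l <;> simp [pvScanB, h]

lemma pv_scan_cons_of_head_ne (c : Char) {l : List Char} (h : l.head? ≠ some '#') :
    pvScanB (c :: l) = c :: pvScanB l := by
  cases l with
  | nil => simp [pvScanB]
  | cons d rest =>
    have hd : d ≠ '#' := by simpa using h
    cases hs : pvSharpChar? c <;> simp [pvScanB, hs, hd]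

lemma pv_repl2_head (a m d : Char) (l : List Char) :
    (pvRepl2 a m (d :: l)).head? = some d ∨ (pvRepl2 a m (d :: l)).head? = some m := by
  cases l with
  | nil => simp [pvRepl2]
  | cons e rest =>
    by_cases hm : d = a ∧ e = '#' <;> simp [pvRepl2, hm]

lemma pv_scan_repl2 {a m : Char} (h : pvSharpChar? a = some m) :
    ∀ (fuel : Nat) (s : List Char), s.length ≤ fuel → pvScanB (pvRepl2 a m s) = pvScanB s := by
  intro fuel
  induction fuel with
  | zero => intro s hs; rw [List.length_eq_zero_iff.mp (Nat.le_zero.mp hs)]; rfl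
  | succ n ih =>
    intro s hs
    match s with
    | [] => rfl
    | [c] => rfl
    | c :: d :: rest =>
      obtain ⟨hmn, hmne, hane⟩ := pv_letter_facts h
      by_cases hk : c = a ∧ d = '#'
      · obtain ⟨rfl, rfl⟩ := hk
        rw [show pvRepl2 c m (c :: '#' :: rest) = m :: pvRepl2 c m rest by simp [pvRepl2]]
        rw [pv_scan_cons_nonsharp hmn]
        rw [ih rest (by simp at hs; omega)]
        simp [pvScanB, h]
      · rw [show pvRepl2 a m (c :: d :: rest) = c :: pvRepl2 a m (d :: rest) by simp [pvRepl2, hk]]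
        cases hs' : pvSharpChar? c with
        | none =>
          rw [pv_scan_cons_nonsharp hs', pv_scan_cons_nonsharp hs']
          rw [ih (d :: rest) (by simp at hs ⊢; omega)]
        | some m' =>
          by_cases hd : d = '#'
          · subst hd
            have hca : c ≠ a := fun hc => hk ⟨hc, rfl⟩
            rw [show pvRepl2 a m ('#' :: rest) = '#' :: pvRepl2 a m rest by
              cases rest with
              | nil => simp [pvRepl2]
              | cons e t =>
                have : ¬ ('#' = a ∧ e = '#') := fun hc => hane hc.1.symm
                simp [pvRepl2, this]]
            rw [show pvScanB (c :: '#' :: pvRepl2 a m rest) = m' :: pvScanB (pvRepl2 a m rest) by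
              simp [pvScanB, hs']]
            rw [ih rest (by simp at hs; omega)]
            simp [pvScanB, hs']
          · have h1 : (pvRepl2 a m (d :: rest)).head? ≠ some '#' := by
              rcases pv_repl2_head a m d rest with he | he <;> rw [he] <;> simp [hd, hmne]
            rw [pv_scan_cons_of_head_ne c h1, pv_scan_cons_of_head_ne c (by simp [hd])]
            rw [ih (d :: rest) (by simp at hs ⊢; omega)]

lemma pv_repl2_after (a m : Char) :
    ∀ (j : Nat) (s : List Char), (∀ i < j, ¬ (s[i]? = some a ∧ s[i + 1]? = some '#')) →
      pvRepl2 a m s = s.take j ++ pvRepl2 a m (s.drop j) := by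
  intro j
  induction j with
  | zero => intro s _; simp
  | succ n ih =>
    intro s hs
    match s with
    | [] => simp [pvRepl2]
    | [c] => cases n <;> simp [pvRepl2]
    | c :: d :: rest =>
      have h0 : ¬ (c = a ∧ d = '#') := by
        intro ⟨h1, h2⟩
        exact hs 0 (Nat.succ_pos n) (by simp [h1, h2])
      rw [show pvRepl2 a m (c :: d :: rest) = c :: pvRepl2 a m (d :: rest) by simp [pvRepl2, h0]]
      rw [ih (d :: rest) (fun i hi => by
        have := hs (i + 1) (by omega)
        simpa using this)]
      simp

lemma pv_repl2_keyfree {a m : Char} (h : pvSharpChar? a = some m) (j : Nat) (s : List Char)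
    (hk : s[j]? = some a ∧ s[j + 1]? = some '#')
    (hbelow : ∀ i < j, ¬ pvKeyAt s i) :
    ∀ i < j + 1, ¬ pvKeyAt (pvRepl2 a m s) i := by
  obtain ⟨hmn, hmne, hane⟩ := pv_letter_facts h
  have hnomatch : ∀ i < j, ¬ (s[i]? = some a ∧ s[i + 1]? = some '#') := by
    intro i hi hc
    exact hbelow i hi ⟨⟨a, hc.1, by simp [h]⟩, hc.2⟩
  have hj1 : j + 1 < s.length := (List.getElem?_eq_some_iff.mp hk.2).1
  have hdrop : s.drop j = a :: '#' :: s.drop (j + 2) := by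
    rw [List.drop_eq_getElem_cons (by omega), List.drop_eq_getElem_cons (by omega)]
    have e1 : s[j] = a := by have := hk.1; rw [List.getElem?_eq_getElem (by omega)] at this; simpa using this
    have e2 : s[j+1] = '#' := by have := hk.2; rw [List.getElem?_eq_getElem (by omega)] at this; simpa using this
    rw [e1, e2]
  have hR : pvRepl2 a m s = s.take j ++ m :: pvRepl2 a m (s.drop (j + 2)) := by
    rw [pv_repl2_after a m j s hnomatch, hdrop]
    simp [pvRepl2]
  have hlen : (s.take j).length = j := by simp; omega
  intro i hi hkey
  rw [hR] at hkey
  obtain ⟨⟨c, hc, hcs⟩, hsh⟩ := hkey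
  rcases Nat.lt_or_ge (i + 1) j with hlt | hge
  · -- both indices inside take j: a key in s below j
    have hc' : s[i]? = some c := by
      rw [List.getElem?_append_left (by omega)] at hc
      rw [List.getElem?_take_of_lt (by omega)] at hc
      exact hc
    have hsh' : s[i + 1]? = some '#' := by
      rw [List.getElem?_append_left (by omega)] at hsh
      rw [List.getElem?_take_of_lt (by omega)] at hsh
      exact hsh
    exact hbelow i (by omega) ⟨⟨c, hc', hcs⟩, hsh'⟩
  · rcases Nat.lt_or_ge i j with hilt | hige
    · -- i + 1 = j: second char is m, not '#'
      have hij : i + 1 = j := by omega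
      rw [hij, List.getElem?_append_right (by omega)] at hsh
      rw [hlen, Nat.sub_self] at hsh
      simp at hsh
      exact hmne hsh
    · -- i = j: first char is m, no sharp letter
      have : i = j := by omega
      subst this
      rw [List.getElem?_append_right (by omega), hlen] at hc
      simp at hc
      rw [← hc] at hcs
      simp [hmn] at hcs

lemma pv_scan_id : ∀ (s : List Char), (∀ i, ¬ pvKeyAt s i) → pvScanB s = s
  | [], _ => rfl
  | [c], _ => rfl
  | c :: d :: rest, h => by
    have h0 : ¬ ((pvSharpChar? c).isSome ∧ d = '#') := by
      intro ⟨h1, h2⟩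
      exact h 0 ⟨⟨c, rfl, h1⟩, by simp [h2]⟩
    have hrec : pvScanB (d :: rest) = d :: rest :=
      pv_scan_id (d :: rest) (fun i hk => h (i + 1) ⟨⟨hk.1.choose, by simpa using hk.1.choose_spec.1, hk.1.choose_spec.2⟩, by simpa using hk.2⟩)
    cases hs : pvSharpChar? c with
    | none => rw [pv_scan_cons_nonsharp hs, hrec]
    | some m' =>
      have hd : d ≠ '#' := fun hd => h0 ⟨by simp [hs], hd⟩
      simp [pvScanB, hs, hd, hrec]

lemma pv_sharp_none_cases {a : Char} (h : pvSharpChar? a = none) :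
    a ≠ 'C' ∧ a ≠ 'D' ∧ a ≠ 'F' ∧ a ≠ 'G' ∧ a ≠ 'A' := by
  refine ⟨?_, ?_, ?_, ?_, ?_⟩ <;> rintro rfl <;> simp [pvSharpChar?] at h

lemma pv_key_ne (x y : Char) (s : String) (hx : s.toList = [x, y]) (a b : Char)
    (h : ¬ (a = x ∧ b = y)) : (s == String.ofList [a, b]) = false := by
  simp only [beq_eq_false_iff_ne, ne_eq, ← String.toList_inj, hx, String.toList_ofList]
  simpa using fun h1 h2 => h ⟨h1.symm, h2.symm⟩

lemma pv_dict_char (a b : Char) :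
    pvSharpDict.get? (String.ofList [a, b]) =
      (match pvSharpChar? a with
       | some m => if b = '#' then some (String.ofList [m]) else none
       | none => none) := by
  cases hs : pvSharpChar? a with
  | some m =>
    rcases pv_sharp_cases hs with ⟨rfl, rfl⟩ | ⟨rfl, rfl⟩ | ⟨rfl, rfl⟩ | ⟨rfl, rfl⟩ | ⟨rfl, rfl⟩ <;>
      · by_cases hb : b = '#'
        · subst hb; decide
        · simp only [if_neg hb]
          have hm : pvSharpDict = PySem.Dict.mk [("C#", "H"), ("D#", "I"), ("F#", "J"), ("G#", "K"), ("A#", "L")] := by decide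
          rw [hm]
          repeat rw [PySem.Dict.get?_mk_cons]
          rw [pv_key_ne 'C' '#' "C#" (by decide) _ _ (fun hc => hb hc.2)]
          rw [pv_key_ne 'D' '#' "D#" (by decide) _ _ (fun hc => hb hc.2)]
          rw [pv_key_ne 'F' '#' "F#" (by decide) _ _ (fun hc => hb hc.2)]
          rw [pv_key_ne 'G' '#' "G#" (by decide) _ _ (fun hc => hb hc.2)]
          rw [pv_key_ne 'A' '#' "A#" (by decide) _ _ (fun hc => hb hc.2)]
          simp [PySem.Dict.get?]
  | none =>
    obtain ⟨h1, h2, h3, h4, h5⟩ := pv_sharp_none_cases hs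
    have hm : pvSharpDict = PySem.Dict.mk [("C#", "H"), ("D#", "I"), ("F#", "J"), ("G#", "K"), ("A#", "L")] := by decide
    rw [hm]
    repeat rw [PySem.Dict.get?_mk_cons]
    rw [pv_key_ne 'C' '#' "C#" (by decide) _ _ (fun hc => h1 hc.1)]
    rw [pv_key_ne 'D' '#' "D#" (by decide) _ _ (fun hc => h2 hc.1)]
    rw [pv_key_ne 'F' '#' "F#" (by decide) _ _ (fun hc => h3 hc.1)]
    rw [pv_key_ne 'G' '#' "G#" (by decide) _ _ (fun hc => h4 hc.1)]
    rw [pv_key_ne 'A' '#' "A#" (by decide) _ _ (fun hc => h5 hc.1)]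
    simp [PySem.Dict.get?]

lemma pv_loopA_inv : ∀ (fuel : Nat) (r j : Int) (s : String), 0 ≤ j → (r - j).toNat ≤ fuel →
    (PySem.Str.len s ≤ r + 1) → (∀ i < j.toNat, ¬ pvKeyAt s.toList i) →
    (pvLoopA (PySem.List.pyRange j r 1) s).toList = pvScanB s.toList := by
  intro fuel
  induction fuel with
  | zero =>
    intro r j s hj hf hlen hb
    have hlc : s.toList.length = s.length := by simp
    simp only [PySem.Str.len_eq] at hlen
    rw [PySem.List.pyRange_one_eq_nil (by omega)]
    show s.toList = pvScanB s.toList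
    refine (pv_scan_id s.toList fun i hk => ?_).symm
    have hi1 := (List.getElem?_eq_some_iff.mp hk.2).1
    exact hb i (by omega) hk
  | succ n ih =>
    intro r j s hj hf hlen hb
    have hlc : s.toList.length = s.length := by simp
    simp only [PySem.Str.len_eq] at hlen
    by_cases hrj : r ≤ j
    · rw [PySem.List.pyRange_one_eq_nil hrj]
      show s.toList = pvScanB s.toList
      refine (pv_scan_id s.toList fun i hk => ?_).symm
      have hi1 := (List.getElem?_eq_some_iff.mp hk.2).1
      exact hb i (by omega) hk
    · have hjr : j < r := by omega
      rw [PySem.List.pyRange_one_cons hjr]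
      show (pvLoopA (j :: PySem.List.pyRange (j + 1) r 1) s).toList = pvScanB s.toList
      rw [pvLoopA]
      by_cases hg : j + 1 > PySem.Str.len s - 1
      · rw [if_pos hg]
        simp only [PySem.Str.len_eq] at hg
        refine (pv_scan_id s.toList fun i hk => ?_).symm
        have hi1 := (List.getElem?_eq_some_iff.mp hk.2).1
        exact hb i (by omega) hk
      · rw [if_neg hg]
        simp only [PySem.Str.len_eq, not_lt] at hg
        have hjlt : j.toNat + 1 < s.toList.length := by omega
        have hg1 : PySem.Str.pyGet? s j = some (s.toList[j.toNat]) := by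
          simp only [PySem.Str.pyGet?_eq, PySem.Chars.pyGet?_eq_listPyGet?]
          exact PySem.List.pyGet?_eq_some_getElem (xs := s.toList) (i := j) (by omega) (by omega)
        have hg2 : PySem.Str.pyGet? s (j + 1) = some (s.toList[j.toNat + 1]) := by
          simp only [PySem.Str.pyGet?_eq, PySem.Chars.pyGet?_eq_listPyGet?]
          have := PySem.List.pyGet?_eq_some_getElem (xs := s.toList) (i := j + 1) (by omega) (by omega)
          rw [this]
          congr 2
          omega
        rw [hg1, hg2]
        set a := s.toList[j.toNat] with ha
        set b := s.toList[j.toNat + 1] with hbdef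
        cases hs : pvSharpChar? a with
        | none =>
          have hd : pvSharpDict.get? (String.ofList [a, b]) = none := by
            simp [pv_dict_char a b, hs]
          show (match pvSharpDict.get? (String.ofList [a, b]) with
              | some rep => pvLoopA (PySem.List.pyRange (j + 1) r 1) (PySem.Str.replace s (String.ofList [a, b]) rep)
              | none => pvLoopA (PySem.List.pyRange (j + 1) r 1) s).toList = pvScanB s.toList
          rw [hd]
          show (pvLoopA (PySem.List.pyRange (j + 1) r 1) s).toList = pvScanB s.toList
          refine ih r (j + 1) s (by omega) (by omega) (by simp only [PySem.Str.len_eq]; omega) ?_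
          intro i hi
          rcases Nat.lt_or_ge i j.toNat with h' | h'
          · exact hb i h'
          · have : i = j.toNat := by omega
            subst this
            rintro ⟨⟨c, hc, hcs⟩, -⟩
            rw [List.getElem?_eq_getElem (by omega)] at hc
            have : c = a := by simpa [ha] using hc.symm
            rw [this, hs] at hcs
            simp at hcs
        | some m =>
          by_cases hbb : b = '#'
          · have hd : pvSharpDict.get? (String.ofList [a, b]) = some (String.ofList [m]) := by
              rw [hbb, pv_dict_char a '#', hs]
              simp
            show (match pvSharpDict.get? (String.ofList [a, b]) with
              | some rep => pvLoopA (PySem.List.pyRange (j + 1) r 1) (PySem.Str.replace s (String.ofList [a, b]) rep)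
              | none => pvLoopA (PySem.List.pyRange (j + 1) r 1) s).toList = pvScanB s.toList
            rw [hd]
            show (pvLoopA (PySem.List.pyRange (j + 1) r 1)
                (PySem.Str.replace s (String.ofList [a, b]) (String.ofList [m]))).toList = pvScanB s.toList
            have hrepl : (PySem.Str.replace s (String.ofList [a, b]) (String.ofList [m])).toList
                = pvRepl2 a m s.toList := by
              rw [PySem.Str.toList_replace, String.toList_ofList, String.toList_ofList, hbb]
              exact pv_replace_eq_repl2 a m s.toList
            have hkj : s.toList[j.toNat]? = some a ∧ s.toList[j.toNat + 1]? = some '#' := by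
              refine ⟨by rw [List.getElem?_eq_getElem (by omega)], ?_⟩
              rw [List.getElem?_eq_getElem (by omega)]
              simp [← hbdef, hbb]
            have hrc : (PySem.Str.replace s (String.ofList [a, b]) (String.ofList [m])).toList.length
                = (pvRepl2 a m s.toList).length := by rw [hrepl]
            rw [ih r (j + 1) (PySem.Str.replace s (String.ofList [a, b]) (String.ofList [m]))
                (by omega) (by omega)
                (by simp only [PySem.Str.len_eq]
                    have h1 := pv_repl2_len a m s.toList
                    have h2 : (PySem.Str.replace s (String.ofList [a, b]) (String.ofList [m])).toList.length
                        = (pvRepl2 a m s.toList).length := by rw [hrepl]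
                    have h3 : (PySem.Str.replace s (String.ofList [a, b]) (String.ofList [m])).toList.length
                        = (PySem.Str.replace s (String.ofList [a, b]) (String.ofList [m])).length :=
                      String.length_toList
                    omega)
                (by rw [hrepl]
                    have := pv_repl2_keyfree hs j.toNat s.toList hkj hb
                    intro i hi
                    exact this i (by omega))]
            rw [hrepl]
            exact pv_scan_repl2 hs s.toList.length s.toList le_rfl
          · have hd : pvSharpDict.get? (String.ofList [a, b]) = none := by
              simp [pv_dict_char a b, hs, hbb]
            show (match pvSharpDict.get? (String.ofList [a, b]) with
              | some rep => pvLoopA (PySem.List.pyRange (j + 1) r 1) (PySem.Str.replace s (String.ofList [a, b]) rep)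
              | none => pvLoopA (PySem.List.pyRange (j + 1) r 1) s).toList = pvScanB s.toList
            rw [hd]
            show (pvLoopA (PySem.List.pyRange (j + 1) r 1) s).toList = pvScanB s.toList
            refine ih r (j + 1) s (by omega) (by omega) (by simp only [PySem.Str.len_eq]; omega) ?_
            intro i hi
            rcases Nat.lt_or_ge i j.toNat with h' | h'
            · exact hb i h'
            · have : i = j.toNat := by omega
              subst this
              rintro ⟨⟨c, hc, hcs⟩, hsh⟩
              rw [List.getElem?_eq_getElem (by omega)] at hsh
              have : b = '#' := by simpa [← hbdef] using hsh
              exact hbb this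

-- ===== VERDICT (by name: the statement is the Claim_ definition above) =====
theorem sharp_convert_spec : Claim_equal_sharp_convert := by
  intro note _
  unfold Spec_sharp_convert sharp_convert sharp_convert_alt
  rw [← String.toList_inj, String.toList_ofList]
  exact pv_loopA_inv (PySem.Str.len note - 1 - 0).toNat (PySem.Str.len note - 1) 0 note
    le_rfl le_rfl (by simp only [PySem.Str.len_eq]; omega) (by simp)
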